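-- pv_equiv track=rewrite | github.com/google-research/multi-morph-checklist | utils.py | combine_dimensions
-- ===== SOURCE A (Python) =====
-- from typing import (
--     Any,
--     Dict,
--     FrozenSet,
--     List,
--     Optional,
--     Set,
--     Tuple,
--     TypeVar,
--     Union,
-- )
--
-- def combine_dimensions(
--     d: Dict[str, Any], duplicates: List[str]
-- ) -> Dict[str, str]:
--   res = {}
--   for dup in duplicates:
--     out = []
--     for k, v in d.items():
--       if get_front_arg(k) == dup:
--         out.append(v)
--     if out:
--       res[".".join(out)] = ""
--   return res
--
-- def get_front_arg(s: str) -> str: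
--   return s.split(".")[0].strip("<>")
-- ===== SOURCE B (Python) =====
-- def get_front_arg(s: str) -> str:
--   return s.split(".")[0].strip("<>")
--
-- def combine_dimensions(d, duplicates):
--   groups = {}
--   for k, v in d.items():
--     groups.setdefault(get_front_arg(k), []).append(v)
--   res = {}
--   for dup in duplicates:
--     vs = groups.get(dup)
--     if vs:
--       res[".".join(vs)] = ""
--   return res
-- ===== Notes on version B (the rewrite author's own statement) =====
-- stated objective: faster
-- what changed: B builds, in one pass over d, a dict grouping the values by their key's front-arg, so each duplicate becomes a single dict lookup instead of a full scan of d.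
import Mathlib
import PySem

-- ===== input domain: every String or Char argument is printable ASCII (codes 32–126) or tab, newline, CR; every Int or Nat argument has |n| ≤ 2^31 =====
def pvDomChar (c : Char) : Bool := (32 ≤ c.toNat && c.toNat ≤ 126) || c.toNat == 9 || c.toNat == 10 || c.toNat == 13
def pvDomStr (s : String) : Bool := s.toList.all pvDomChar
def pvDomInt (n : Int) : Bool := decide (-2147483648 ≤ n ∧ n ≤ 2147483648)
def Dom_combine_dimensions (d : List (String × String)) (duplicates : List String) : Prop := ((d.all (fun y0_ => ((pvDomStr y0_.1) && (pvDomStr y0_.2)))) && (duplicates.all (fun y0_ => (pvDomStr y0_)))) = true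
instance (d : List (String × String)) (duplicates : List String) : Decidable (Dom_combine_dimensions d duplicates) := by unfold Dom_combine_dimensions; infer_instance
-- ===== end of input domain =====

-- B groups d's values by the front-arg of their key in ONE pass, replacing A's full scan of d per duplicate.

-- get_front_arg(s) = s.split(".")[0].strip("<>")  (split "." always yields a nonempty list, so headD is exact)
def getFrontArg (s : String) : String :=
  PySem.Str.stripChars (((PySem.Str.split? s ".").getD []).headD "") "<>"

-- ===== PORT A =====
def combine_dimensions (d : List (String × String)) (duplicates : List String) : List (String × String) :=
  let dd := PySem.Dict.ofList d
  (duplicates.foldl (fun res dup =>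
      let out := dd.items.foldl (fun out kv =>
        if getFrontArg kv.1 == dup then out ++ [kv.2] else out) []
      if out ≠ [] then res.insert (PySem.Str.join "." out) "" else res)
    PySem.Dict.empty).items

-- ===== PORT B =====
def combine_dimensions_alt (d : List (String × String)) (duplicates : List String) : List (String × String) :=
  let dd := PySem.Dict.ofList d
  let groups : PySem.Dict String (List String) :=
    dd.items.foldl (fun g kv => g.modify (getFrontArg kv.1) [] (· ++ [kv.2])) PySem.Dict.empty
  (duplicates.foldl (fun res dup =>
      let vs := groups.getD dup []
      if vs ≠ [] then res.insert (PySem.Str.join "." vs) "" else res)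
    PySem.Dict.empty).items

-- ===== PRECONDITION & SPEC =====
def Spec_combine_dimensions (d : List (String × String)) (duplicates : List String) (out : List (String × String)) : Prop := out = combine_dimensions_alt d duplicates
instance (d : List (String × String)) (duplicates : List String) (out : List (String × String)) : Decidable (Spec_combine_dimensions d duplicates out) := by unfold Spec_combine_dimensions; infer_instance

-- ===== CLAIM (what is proved, stated in full; the proofs are below) =====
def Claim_equal_combine_dimensions : Prop := ∀ (d : List (String × String)) (duplicates : List String), Dom_combine_dimensions d duplicates → Spec_combine_dimensions d duplicates (combine_dimensions d duplicates)

-- ===== LEMMAS AND PROOFS =====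

-- A's inner scan over the items collects exactly the group B stores under `dup`.
theorem inner_eq_group (items : List (String × String)) (dup : String) :
    items.foldl (fun out kv => if getFrontArg kv.1 == dup then out ++ [kv.2] else out) []
      = (items.foldl (fun g kv => g.modify (getFrontArg kv.1) [] (· ++ [kv.2]))
          (PySem.Dict.empty : PySem.Dict String (List String))).getD dup [] := by
  have hB : items.foldl (fun g kv => g.modify (getFrontArg kv.1) [] (· ++ [kv.2]))
        (PySem.Dict.empty : PySem.Dict String (List String))
      = (items.map (fun kv => (getFrontArg kv.1, kv.2))).foldl
          (fun g p => g.modify p.1 [] (· ++ [p.2])) PySem.Dict.empty := by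
    rw [List.foldl_map]
  rw [hB, PySem.Dict.getD_foldl_modify_append, PySem.Dict.getD_empty,
      PySem.List.foldl_append_if]
  simp [List.filter_map, List.map_map, Function.comp_def]

theorem combine_dimensions_spec : Claim_equal_combine_dimensions := by
  intro d duplicates _
  unfold Spec_combine_dimensions combine_dimensions combine_dimensions_alt
  simp only []
  congr 1
  apply PySem.List.foldl_congr_mem
  intro res dup _
  rw [inner_eq_group]
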